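-- pv_equiv track=rewrite | github.com/clouvelai/kalshiflow | backend/src/kalshiflow_rl/traderv3/deep_agent/agent.py | _extract_insight_from_text
-- ===== SOURCE A (Python) =====
-- def _extract_insight_from_text(text: str, insight_type: str) -> str:
--     """
--     Extract a specific type of insight from text.
--
--     Args:
--         text: The text to search
--         insight_type: Type of insight ("learn", "mistake", "pattern")
--
--     Returns:
--         Extracted insight or default message
--     """
--     if not text or not text.strip():
--         return "Reflected on trade outcome"
--
--     text_lower = text.lower()
--
--     # Keywords by insight type
--     keywords = {
--         "learn": ["learned", "learning", "insight", "takeaway", "realized", "understand now"],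
--         "mistake": ["mistake", "error", "wrong", "shouldn't have", "should not have", "failed to"],
--         "pattern": ["pattern", "when", "if", "tends to", "usually", "consistently", "signal"],
--     }
--
--     # Look for sentences containing keywords
--     sentences = text.replace("\n", " ").split(".")
--
--     for sentence in sentences:
--         sentence_lower = sentence.lower().strip()
--         if any(kw in sentence_lower for kw in keywords.get(insight_type, [])):
--             # Clean and truncate the sentence
--             clean = sentence.strip()
--             if len(clean) > 200:
--                 clean = clean[:197] + "..."
--             if clean:
--                 return clean
--
--     # Fallback: return first meaningful sentence
--     for sentence in sentences:
--         clean = sentence.strip()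
--         if len(clean) > 20:  # Ignore very short fragments
--             if len(clean) > 200:
--                 clean = clean[:197] + "..."
--             return clean
--
--     return "Reflected on trade outcome"
-- ===== SOURCE B (Python) =====
-- def _extract_insight_from_text(text: str, insight_type: str) -> str:
--     if not text or not text.strip():
--         return "Reflected on trade outcome"
--
--     keywords = {
--         "learn": ["learned", "learning", "insight", "takeaway", "realized", "understand now"],
--         "mistake": ["mistake", "error", "wrong", "shouldn't have", "should not have", "failed to"],
--         "pattern": ["pattern", "when", "if", "tends to", "usually", "consistently", "signal"],
--     }
--     kws = keywords.get(insight_type, [])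
--
--     # One pass over the sentences, keeping the first keyword hit and the
--     # first "meaningful" (length > 20) sentence as candidates.
--     kw_hit = None
--     meaningful = None
--     for sentence in text.replace("\n", " ").split("."):
--         clean = sentence.strip()
--         if kw_hit is None and clean and any(kw in sentence.lower().strip() for kw in kws):
--             kw_hit = clean
--         if meaningful is None and len(clean) > 20:
--             meaningful = clean
--
--     chosen = kw_hit if kw_hit is not None else meaningful
--     if chosen is None:
--         return "Reflected on trade outcome"
--     return chosen if len(chosen) <= 200 else chosen[:197] + "..."
-- ===== Notes on version B (the rewrite author's own statement) =====
-- stated objective: simpler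
-- what changed: Replaces A's two sequential scans over the sentence list (keyword scan, then meaningful-fallback scan) with a single pass that maintains the first keyword hit and the first meaningful sentence as candidates, truncating once at the end.
import Mathlib
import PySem

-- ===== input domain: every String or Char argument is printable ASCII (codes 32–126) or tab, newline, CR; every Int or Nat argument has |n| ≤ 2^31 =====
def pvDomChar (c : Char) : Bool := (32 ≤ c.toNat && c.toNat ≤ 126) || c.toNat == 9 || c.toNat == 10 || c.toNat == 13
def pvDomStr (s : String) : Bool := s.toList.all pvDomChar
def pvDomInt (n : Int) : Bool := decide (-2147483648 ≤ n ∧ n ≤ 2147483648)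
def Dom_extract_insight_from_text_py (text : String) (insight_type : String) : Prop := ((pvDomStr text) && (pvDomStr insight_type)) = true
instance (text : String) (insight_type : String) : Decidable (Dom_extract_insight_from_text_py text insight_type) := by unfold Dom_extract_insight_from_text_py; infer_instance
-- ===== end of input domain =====

-- B replaces A's two sequential scans over the sentences by one pass keeping two candidates; same return value, simpler control flow.

-- shared literal data and the truncation step both Pythons perform verbatim
def pvKeywords : PySem.Dict String (List String) :=
  PySem.Dict.ofList
    [("learn", ["learned", "learning", "insight", "takeaway", "realized", "understand now"]),
     ("mistake", ["mistake", "error", "wrong", "shouldn't have", "should not have", "failed to"]),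
     ("pattern", ["pattern", "when", "if", "tends to", "usually", "consistently", "signal"])]

def pvTrunc (clean : String) : String :=
  if 200 < PySem.Str.len clean then PySem.Str.slice clean none (some 197) ++ "..." else clean

def pvSentences (text : String) : List String :=
  (PySem.Str.split? (PySem.Str.replace text "\n" " ") ".").getD []

def pvKwMatch (kws : List String) (s : String) : Bool :=
  kws.any (fun kw => PySem.Str.isIn kw (PySem.Str.strip (PySem.Str.lower s)))

-- ===== PORT A =====
-- first loop of A: first sentence matching a keyword (skipping matches whose strip is empty)
def pvALoop1 (kws : List String) : List String → Option String
  | [] => none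
  | s :: rest =>
    if pvKwMatch kws s then
      let clean := pvTrunc (PySem.Str.strip s)
      if clean = "" then pvALoop1 kws rest else some clean
    else pvALoop1 kws rest

-- second loop of A: first sentence whose strip has length > 20
def pvALoop2 : List String → Option String
  | [] => none
  | s :: rest =>
    let clean := PySem.Str.strip s
    if 20 < PySem.Str.len clean then some (pvTrunc clean) else pvALoop2 rest

def extract_insight_from_text_py (text : String) (insight_type : String) : String :=
  if text = "" ∨ PySem.Str.strip text = "" then "Reflected on trade outcome"
  else
    let kws := pvKeywords.getD insight_type []
    let sentences := pvSentences text
    match pvALoop1 kws sentences with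
    | some c => c
    | none =>
      match pvALoop2 sentences with
      | some c => c
      | none => "Reflected on trade outcome"

-- ===== PORT B =====
-- single pass: acc = (first keyword hit, first meaningful sentence), both untruncated
def pvStep (kws : List String) (acc : Option String × Option String) (s : String) : Option String × Option String :=
  let clean := PySem.Str.strip s
  let k := match acc.1 with
    | some v => some v
    | none => if clean ≠ "" ∧ pvKwMatch kws s then some clean else none
  let m := match acc.2 with
    | some v => some v
    | none => if 20 < PySem.Str.len clean then some clean else none
  (k, m)

def extract_insight_from_text_py_alt (text : String) (insight_type : String) : String :=
  if PySem.Str.strip text = "" then "Reflected on trade outcome"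
  else
    let kws := pvKeywords.getD insight_type []
    let r := (pvSentences text).foldl (pvStep kws) (none, none)
    match r.1.orElse (fun _ => r.2) with
    | some c => pvTrunc c
    | none => "Reflected on trade outcome"

-- ===== PRECONDITION & SPEC =====
def Spec_extract_insight_from_text_py (text : String) (insight_type : String) (out : String) : Prop := out = extract_insight_from_text_py_alt text insight_type
instance (text : String) (insight_type : String) (out : String) : Decidable (Spec_extract_insight_from_text_py text insight_type out) := by unfold Spec_extract_insight_from_text_py; infer_instance

-- ===== CLAIM (what is proved, stated in full; the proofs are below) =====
def Claim_equal_extract_insight_from_text_py : Prop := ∀ (text : String) (insight_type : String), Dom_extract_insight_from_text_py text insight_type → Spec_extract_insight_from_text_py text insight_type (extract_insight_from_text_py text insight_type)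

-- ===== LEMMAS AND PROOFS =====

-- predicates underlying the two candidate streams
def pvPK (kws : List String) (s : String) : Bool :=
  decide (PySem.Str.strip s ≠ "") && pvKwMatch kws s

def pvPM (s : String) : Bool := decide (20 < PySem.Str.len (PySem.Str.strip s))

theorem pvTrunc_eq_empty_iff (c : String) : pvTrunc c = "" ↔ c = "" := by
  unfold pvTrunc
  split_ifs with h
  · constructor
    · intro he
      exfalso
      have := congrArg String.toList he
      rw [String.toList_append] at this
      simp at this
    · intro hc; subst hc; simp [PySem.Str.len] at h
  · exact Iff.rfl

theorem pvTrunc_empty : pvTrunc "" = "" := (pvTrunc_eq_empty_iff "").mpr rfl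

theorem pvALoop1_eq_find (kws : List String) (xs : List String) :
    pvALoop1 kws xs = (xs.find? (pvPK kws)).map (fun s => pvTrunc (PySem.Str.strip s)) := by
  induction xs with
  | nil => simp [pvALoop1]
  | cons s rest ih =>
    by_cases hm : pvKwMatch kws s
    · by_cases hc : PySem.Str.strip s = ""
      · have hb : pvPK kws s = false := by
          unfold pvPK; simp [hc]
        rw [List.find?_cons_of_neg (by simp [hb]), pvALoop1]
        simp only [hm, if_pos, hc, pvTrunc_empty]
        exact ih
      · have ht : pvTrunc (PySem.Str.strip s) ≠ "" := fun h => hc ((pvTrunc_eq_empty_iff _).mp h)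
        have hb : pvPK kws s = true := by
          unfold pvPK; simp [hc, hm]
        rw [List.find?_cons_of_pos hb, pvALoop1]
        simp [hm, ht]
    · have hb : pvPK kws s = false := by
        unfold pvPK; simp [hm]
      rw [List.find?_cons_of_neg (by simp [hb]), pvALoop1]
      simp only [hm, Bool.false_eq_true, if_neg, not_false_iff]
      exact ih

theorem pvALoop2_eq_find (xs : List String) :
    pvALoop2 xs = (xs.find? pvPM).map (fun s => pvTrunc (PySem.Str.strip s)) := by
  induction xs with
  | nil => simp [pvALoop2]
  | cons s rest ih =>
    by_cases h : 20 < PySem.Str.len (PySem.Str.strip s)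
    · have hb : pvPM s = true := by unfold pvPM; exact decide_eq_true h
      rw [List.find?_cons_of_pos hb, pvALoop2, if_pos h]
      simp
    · have hb : ¬ pvPM s = true := by unfold pvPM; simp only [decide_eq_true_eq]; exact h
      rw [List.find?_cons_of_neg hb, pvALoop2, if_neg h]
      exact ih

theorem pvOrFind (p : String → Bool) (s : String) (rest : List String) :
    (if p s then some (PySem.Str.strip s) else none).orElse
        (fun _ => ((rest.find? p).map PySem.Str.strip)) =
      (((s :: rest).find? p).map PySem.Str.strip) := by
  by_cases h : p s = true
  · rw [List.find?_cons_of_pos h]; simp [h]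
  · rw [List.find?_cons_of_neg h]; simp [h]

theorem pvFoldl_step (kws : List String) (xs : List String) (k0 m0 : Option String) :
    xs.foldl (pvStep kws) (k0, m0) =
      (k0.orElse (fun _ => (xs.find? (pvPK kws)).map PySem.Str.strip),
       m0.orElse (fun _ => (xs.find? pvPM).map PySem.Str.strip)) := by
  induction xs generalizing k0 m0 with
  | nil => cases k0 <;> cases m0 <;> simp
  | cons s rest ih =>
    rw [List.foldl_cons, ih]
    have hstep : pvStep kws (k0, m0) s =
        (k0.orElse (fun _ => if pvPK kws s then some (PySem.Str.strip s) else none),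
         m0.orElse (fun _ => if pvPM s then some (PySem.Str.strip s) else none)) := by
      unfold pvStep pvPK pvPM
      cases k0 <;> cases m0 <;>
        by_cases h1 : PySem.Str.strip s ≠ "" ∧ pvKwMatch kws s <;>
        by_cases h2 : 20 < PySem.Str.len (PySem.Str.strip s) <;>
          simp [h1, h2]
    rw [hstep]
    apply Prod.ext
    · cases k0 with
      | some v => simp
      | none => simpa using pvOrFind (pvPK kws) s rest
    · cases m0 with
      | some v => simp
      | none => simpa using pvOrFind pvPM s rest

theorem pvStrip_empty : PySem.Str.strip "" = "" := by decide

-- ===== VERDICT (by name: the statement is the Claim_ definition above) =====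
theorem extract_insight_from_text_py_spec : Claim_equal_extract_insight_from_text_py := by
  intro text insight_type _
  unfold Spec_extract_insight_from_text_py extract_insight_from_text_py extract_insight_from_text_py_alt
  by_cases hs : PySem.Str.strip text = ""
  · rw [if_pos (Or.inr hs), if_pos hs]
  · have hne : ¬(text = "" ∨ PySem.Str.strip text = "") := by
      rintro (h | h)
      · exact hs (h ▸ pvStrip_empty)
      · exact hs h
    rw [if_neg hne, if_neg hs]
    simp only [pvALoop1_eq_find, pvALoop2_eq_find, pvFoldl_step]
    cases hf1 : (pvSentences text).find? (pvPK (pvKeywords.getD insight_type [])) with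
    | some s => simp
    | none =>
      cases hf2 : (pvSentences text).find? pvPM with
      | some s => simp
      | none => simp
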